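-- pv_equiv track=rewrite | github.com/ZhixinHan/DEQA | DEQA/DataProcess/DataProcess.py | processing_word_ids
-- ===== SOURCE A (Python) =====
-- def processing_word_ids(word_ids):
--     second_none_index = None
--     none_count = 0
--
--     for i, value in enumerate(word_ids):
--         if value is None:
--             none_count += 1
--             if none_count == 2:
--                 second_none_index = i
--                 break
--
--     if second_none_index is not None:
--         for i in range(second_none_index + 1, len(word_ids)):
--             word_ids[i] = None
--
--     return word_ids
-- ===== SOURCE B (Python) =====
-- def processing_word_ids(word_ids):
--     out = []
--     nones = 0
--     for value in word_ids:
--         out.append(None if nones >= 2 else value)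
--         if value is None:
--             nones += 1
--     word_ids[:] = out
--     return word_ids
-- ===== Notes on version B (the rewrite author's own statement) =====
-- stated objective: simpler
-- what changed: Instead of first locating the index of the second None and then nulling the tail in a second loop, B rebuilds the whole list in a single streaming pass with a running None counter (emitting None once two Nones have been seen) and writes it back wholesale.
import Mathlib
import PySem

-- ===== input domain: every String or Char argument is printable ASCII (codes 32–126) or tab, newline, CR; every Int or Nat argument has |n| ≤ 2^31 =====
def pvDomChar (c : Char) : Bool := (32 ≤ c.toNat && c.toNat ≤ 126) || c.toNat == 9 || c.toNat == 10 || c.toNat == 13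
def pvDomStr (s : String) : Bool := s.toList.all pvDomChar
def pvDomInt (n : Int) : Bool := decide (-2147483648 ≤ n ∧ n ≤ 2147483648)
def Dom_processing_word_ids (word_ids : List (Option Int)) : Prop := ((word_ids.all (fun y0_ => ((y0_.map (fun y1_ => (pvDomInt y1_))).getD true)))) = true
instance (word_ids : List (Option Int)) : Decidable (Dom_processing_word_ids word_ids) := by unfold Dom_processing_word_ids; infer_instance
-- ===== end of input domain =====

-- B replaces A's two staged loops (find the index of the second None, then null the
-- tail element-wise) by a single streaming pass with a running None counter that
-- rebuilds the list (objective: simpler). A mutates its argument in place in Python;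
-- B performs the equivalent in-place write via word_ids[:] = out, and the equivalence
-- proved here is about the RETURN value.

-- ===== PORT A =====
-- the enumerate loop with break: returns the index of the second None, if reached
def pwFindSecond : List (Option Int) → Int → Nat → Option Int
  | [], _, _ => none
  | v :: rest, i, noneCount =>
    if v = none then
      if noneCount + 1 = 2 then some i
      else pwFindSecond rest (i + 1) (noneCount + 1)
    else pwFindSecond rest (i + 1) noneCount

def processing_word_ids (word_ids : List (Option Int)) : List (Option Int) :=
  match pwFindSecond word_ids 0 0 with
  | none => word_ids
  | some secondNoneIndex =>
      (PySem.List.pyRange (secondNoneIndex + 1) word_ids.length 1).foldl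
        (fun acc i => PySem.List.pySetD acc i none) word_ids

-- ===== PORT B =====
def processing_word_ids_alt (word_ids : List (Option Int)) : List (Option Int) :=
  (word_ids.foldl
    (fun (acc : List (Option Int) × Nat) value =>
      (acc.1 ++ [if 2 ≤ acc.2 then none else value],
       if value = none then acc.2 + 1 else acc.2))
    ([], 0)).1

-- ===== PRECONDITION & SPEC =====
def Spec_processing_word_ids (word_ids : List (Option Int)) (out : List (Option Int)) : Prop := out = processing_word_ids_alt word_ids
instance (word_ids : List (Option Int)) (out : List (Option Int)) : Decidable (Spec_processing_word_ids word_ids out) := by unfold Spec_processing_word_ids; infer_instance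

-- ===== CLAIM (what is proved, stated in full; the proofs are below) =====
def Claim_equal_processing_word_ids : Prop := ∀ (word_ids : List (Option Int)), Dom_processing_word_ids word_ids → Spec_processing_word_ids word_ids (processing_word_ids word_ids)

-- ===== LEMMAS AND PROOFS =====

-- B's loop body, written as a structural recursion on the input list
def pwGo : List (Option Int) → Nat → List (Option Int)
  | [], _ => []
  | v :: r, c => (if 2 ≤ c then none else v) :: pwGo r (if v = none then c + 1 else c)

theorem pwFold_eq_go : ∀ (xs : List (Option Int)) (acc : List (Option Int)) (c : Nat),
    (xs.foldl
      (fun (acc : List (Option Int) × Nat) value =>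
        (acc.1 ++ [if 2 ≤ acc.2 then none else value],
         if value = none then acc.2 + 1 else acc.2))
      (acc, c)).1 = acc ++ pwGo xs c := by
  intro xs
  induction xs with
  | nil => intro acc c; simp [pwGo]
  | cons v r ih => intro acc c; simp [pwGo, ih]

-- the relative index of the second None, as A's first loop computes it
def pwFindRel : List (Option Int) → Nat → Option Nat
  | [], _ => none
  | v :: r, c =>
    if v = none then
      if c + 1 = 2 then some 0 else (pwFindRel r (c + 1)).map (· + 1)
    else (pwFindRel r c).map (· + 1)

theorem pwFindSecond_rel : ∀ (xs : List (Option Int)) (s : Int) (c : Nat),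
    pwFindSecond xs s c = (pwFindRel xs c).map (fun k => s + k) := by
  intro xs
  induction xs with
  | nil => intro s c; simp [pwFindSecond, pwFindRel]
  | cons v r ih =>
    intro s c
    by_cases hv : v = none
    · simp only [pwFindSecond, pwFindRel, hv, if_pos rfl]
      by_cases hc : c + 1 = 2
      · simp [hc]
      · simp only [if_neg hc, ih]
        cases pwFindRel r (c + 1) <;> simp <;> ring
    · simp only [pwFindSecond, pwFindRel, if_neg hv, ih]
      cases pwFindRel r c <;> simp <;> ring

-- pwGo with counter ≥ 2 nulls everything
theorem pwGo_two : ∀ (xs : List (Option Int)) (c : Nat), 2 ≤ c →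
    pwGo xs c = List.replicate xs.length none := by
  intro xs
  induction xs with
  | nil => intro c _; simp [pwGo]
  | cons v r ih =>
    intro c hc
    simp only [pwGo, if_pos hc, List.length_cons, List.replicate_succ]
    congr 1
    exact ih _ (by split <;> omega)

-- pwGo with counter < 2 equals take-then-null at the second-None position
theorem pwGo_char : ∀ (xs : List (Option Int)) (c : Nat), c < 2 →
    pwGo xs c = (match pwFindRel xs c with
      | none => xs
      | some k => xs.take (k + 1) ++ List.replicate (xs.length - (k + 1)) none) := by
  intro xs
  induction xs with
  | nil => intro c _; simp [pwGo, pwFindRel]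
  | cons v r ih =>
    intro c hc
    by_cases hv : v = none
    · by_cases hc1 : c + 1 = 2
      · simp only [pwGo, pwFindRel, hv, if_pos rfl, if_pos hc1, if_neg (by omega : ¬ 2 ≤ c)]
        simp [pwGo_two r (c + 1) (by omega)]
      · have hc0 : c = 0 := by omega
        simp only [pwGo, pwFindRel, hv, if_true, if_neg hc1, if_neg (by omega : ¬ 2 ≤ c)]
        rw [ih (c + 1) (by omega)]
        cases h : pwFindRel r (c + 1) with
        | none => simp
        | some k => simp [List.replicate]
    · simp only [pwGo, pwFindRel, if_neg hv, if_neg (by omega : ¬ 2 ≤ c)]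
      rw [ih c hc]
      cases h : pwFindRel r c with
      | none => simp
      | some k => simp

-- the nulling loop over range(a, len(l)) is a take ++ replicate-None
theorem pwSetAll_aux : ∀ (k : Nat) (l : List (Option Int)) (a : Int), 0 ≤ a →
    l.length ≤ a.toNat + k →
    (PySem.List.pyRange a (l.length : Int) 1).foldl
        (fun acc i => PySem.List.pySetD acc i none) l =
      l.take a.toNat ++ List.replicate (l.length - a.toNat) none := by
  intro k
  induction k with
  | zero =>
    intro l a ha hlen
    rw [PySem.List.pyRange_one_eq_nil (by omega)]
    rw [List.take_of_length_le (by omega), Nat.sub_eq_zero_of_le (by omega)]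
    simp
  | succ k ih =>
    intro l a ha hlen
    by_cases hlt : a.toNat < l.length
    · rw [PySem.List.pyRange_one_cons (by omega)]
      simp only [List.foldl_cons]
      rw [PySem.List.pySetD_of_nonneg _ _ ha]
      have hlen' : (l.set a.toNat none).length = l.length := by simp
      have := ih (l.set a.toNat none) (a + 1) (by omega)
        (by rw [hlen']; omega)
      rw [hlen'] at this
      rw [this]
      have hset : l.set a.toNat none = l.take a.toNat ++ none :: l.drop (a.toNat + 1) :=
        List.set_eq_take_cons_drop none hlt
      have htk : (l.set a.toNat none).take (a + 1).toNat = l.take a.toNat ++ [none] := by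
        rw [hset, List.take_append]
        have h1 : (l.take a.toNat).length = a.toNat := by simp; omega
        have h2 : (a + 1).toNat = a.toNat + 1 := by omega
        rw [h2, h1]
        rw [List.take_of_length_le (by omega)]
        simp
      rw [htk]
      have h2 : (a + 1).toNat = a.toNat + 1 := by omega
      rw [h2]
      have h3 : l.length - a.toNat = (l.length - (a.toNat + 1)) + 1 := by omega
      rw [h3]
      simp [List.replicate_succ]
    · rw [PySem.List.pyRange_one_eq_nil (by omega)]
      rw [List.take_of_length_le (by omega), Nat.sub_eq_zero_of_le (by omega)]
      simp

theorem pwMain (w : List (Option Int)) :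
    processing_word_ids w = processing_word_ids_alt w := by
  have hb : processing_word_ids_alt w = pwGo w 0 := by
    simpa using pwFold_eq_go w [] 0
  rw [hb, pwGo_char w 0 (by omega)]
  simp only [processing_word_ids, pwFindSecond_rel w 0 0]
  cases h : pwFindRel w 0 with
  | none => simp
  | some k =>
    simp only [Option.map_some]
    have := pwSetAll_aux w.length w ((0 : Int) + k + 1) (by omega) (by omega)
    have ht : ((0 : Int) + k + 1).toNat = k + 1 := by omega
    rw [ht] at this
    exact this

-- ===== VERDICT (by name: the statement is the Claim_ definition above) =====
theorem processing_word_ids_spec : Claim_equal_processing_word_ids := by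
  intro word_ids _
  exact pwMain word_ids
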